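-- pv_equiv track=rewrite | github.com/ericlee0112/interviewprep | playground.py | part1
-- ===== SOURCE A (Python) =====
-- def part1(orders):
--     orders = sorted(orders, key = lambda x: x[1])
--     totalWaitTimes = []
--     timeUntilDriverIsIdle = 0
--
--     for i in range(len(orders)):
--         timeOfExecution = orders[i][1]
--         timeToFulfillOrder = orders[i][0]
--         if i == 0:
--             totalWaitTimes.append(timeToFulfillOrder)
--             timeUntilDriverIsIdle = timeOfExecution + timeToFulfillOrder
--         else:
--             # total wait time for this order
--             timeToWaitUntilDriverBecomesIdle = timeUntilDriverIsIdle - timeOfExecution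
--             waitTimeToFulfillOrder = timeToFulfillOrder + timeToWaitUntilDriverBecomesIdle
--             totalWaitTimes.append(waitTimeToFulfillOrder)
--             timeUntilDriverIsIdle += timeToFulfillOrder
--
--     return totalWaitTimes
-- ===== SOURCE B (Python) =====
-- def part1(orders):
--     if not orders:
--         return []
--     ordered = sorted(orders, key=lambda x: x[1])
--     base = min(e for _, e in orders)
--     total = sum(t for t, _ in ordered)
--     out = []
--     for t, e in reversed(ordered):
--         out.append(base + total - e)
--         total -= t
--     out.reverse()
--     return out
-- ===== Notes on version B (the rewrite author's own statement) =====
-- stated objective: alternative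
-- what changed: Builds the answer back-to-front: starts from the grand total of fulfillment times and walks the sorted list in reverse, subtracting each fulfillment time, so the forward stateful idle-time accumulator and the i==0 special case disappear; the base offset comes from min() instead of the first sorted element.
import Mathlib
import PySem

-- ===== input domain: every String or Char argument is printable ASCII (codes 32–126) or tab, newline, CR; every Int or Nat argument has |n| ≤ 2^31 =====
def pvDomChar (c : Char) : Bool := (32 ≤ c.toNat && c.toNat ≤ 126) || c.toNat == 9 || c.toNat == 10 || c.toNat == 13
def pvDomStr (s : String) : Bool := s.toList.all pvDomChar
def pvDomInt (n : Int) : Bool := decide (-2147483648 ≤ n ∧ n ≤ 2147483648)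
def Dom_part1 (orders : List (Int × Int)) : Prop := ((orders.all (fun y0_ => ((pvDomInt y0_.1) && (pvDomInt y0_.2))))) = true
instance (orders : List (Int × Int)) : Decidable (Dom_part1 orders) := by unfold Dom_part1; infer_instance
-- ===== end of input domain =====

-- B builds the answer back-to-front from the grand total of fulfillment times,
-- walking the sorted list in reverse; same cost as A, different decomposition.


-- ===== PORT A =====
-- A's loop body: state = (totalWaitTimes, timeUntilDriverIsIdle), i the loop index
def part1Body (os : List (Int × Int)) (st : List Int × Int) (i : Int) : List Int × Int :=
  let timeOfExecution := (PySem.List.pyGetD os i (0, 0)).2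
  let timeToFulfillOrder := (PySem.List.pyGetD os i (0, 0)).1
  if i == 0 then
    (st.1 ++ [timeToFulfillOrder], timeOfExecution + timeToFulfillOrder)
  else
    let timeToWaitUntilDriverBecomesIdle := st.2 - timeOfExecution
    let waitTimeToFulfillOrder := timeToFulfillOrder + timeToWaitUntilDriverBecomesIdle
    (st.1 ++ [waitTimeToFulfillOrder], st.2 + timeToFulfillOrder)

def part1 (orders : List (Int × Int)) : List Int :=
  let os := PySem.List.sorted orders (fun x => x.2) false
  ((PySem.List.pyRange 0 (os.length : Int) 1).foldl (part1Body os) ([], 0)).1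

-- ===== PORT B =====
-- Source B's reversed loop body: state = (out, total); appends base+total-e and subtracts t
def revBody (base : Int) (st : List Int × Int) (p : Int × Int) : List Int × Int :=
  (st.1 ++ [base + st.2 - p.2], st.2 - p.1)

def part1_alt (orders : List (Int × Int)) : List Int :=
  if orders = [] then []
  else
    let ordered := PySem.List.sorted orders (fun x => x.2) false
    -- min(e for _, e in orders); the none branch is unreachable (orders ≠ [])
    match PySem.List.min? (orders.map (·.2)) (fun y => y) with
    | none => []
    | some base =>
      let total := (ordered.map (·.1)).sum
      (ordered.reverse.foldl (revBody base) ([], total)).1.reverse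

-- ===== PRECONDITION & SPEC =====
def Spec_part1 (orders : List (Int × Int)) (out : List Int) : Prop := out = part1_alt orders
instance (orders : List (Int × Int)) (out : List Int) : Decidable (Spec_part1 orders out) := by unfold Spec_part1; infer_instance

-- ===== CLAIM (what is proved, stated in full; the proofs are below) =====
def Claim_equal_part1 : Prop := ∀ (orders : List (Int × Int)), Dom_part1 orders → Spec_part1 orders (part1 orders)

-- ===== LEMMAS AND PROOFS =====

-- common denotation: wait time of each order with base offset and running prefix sum s
def waits (base : Int) (s : Int) : List (Int × Int) → List Int
  | [] => []
  | (t, e) :: r => (s + t + base - e) :: waits base (s + t) r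

-- A's body, read on (index, element) pairs
def part1Body2 (st : List Int × Int) (p : Int × (Int × Int)) : List Int × Int :=
  if p.1 == 0 then
    (st.1 ++ [p.2.1], p.2.2 + p.2.1)
  else
    (st.1 ++ [p.2.1 + (st.2 - p.2.2)], st.2 + p.2.1)

-- the tail loop (all indices ≥ 1) with idle = base + s appends waits base s
lemma foldA_tail : ∀ (l : List (Int × Int)) (k : Int), 1 ≤ k →
    ∀ (acc : List Int) (base s : Int),
    ((PySem.List.enumerate l k).foldl part1Body2 (acc, base + s)).1
      = acc ++ waits base s l := by
  intro l
  induction l with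
  | nil => intro k _ acc base s; simp [PySem.List.enumerate_nil, waits]
  | cons x r ih =>
    intro k hk acc base s
    obtain ⟨t, e⟩ := x
    rw [PySem.List.enumerate_cons]
    have hk0 : (k == 0) = false := by simp; omega
    simp only [List.foldl_cons, part1Body2, hk0, Bool.false_eq_true, if_false]
    have := ih (k + 1) (by omega) (acc ++ [t + (base + s - e)]) base (s + t)
    rw [show base + s + t = base + (s + t) by ring] at *
    simpa [waits, show s + t + base - e = t + (base + s - e) by ring] using this

-- A's whole loop equals waits over the sorted list
lemma foldA_eq_waits : ∀ (os : List (Int × Int)),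
    ((PySem.List.pyRange 0 (os.length : Int) 1).foldl (part1Body os) ([], 0)).1
      = match os with
        | [] => []
        | (_, e0) :: _ => waits e0 0 os := by
  intro os
  have hfold : (PySem.List.pyRange 0 (os.length : Int) 1).foldl (part1Body os) ([], 0)
      = (PySem.List.enumerate os 0).foldl part1Body2 ([], 0) := by
    rw [PySem.List.enumerate_eq_map_pyRange os ((0 : Int), (0 : Int)), List.foldl_map]
    simp only [PySem.List.len_eq]
    rfl
  rw [hfold]
  match os with
  | [] => rfl
  | (t0, e0) :: r =>
    rw [PySem.List.enumerate_cons, List.foldl_cons]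
    have h0 : part1Body2 ([], 0) (0, (t0, e0)) = ([t0], e0 + t0) := by
      simp [part1Body2]
    rw [h0]
    have := foldA_tail r 1 (by omega) [t0] e0 t0
    simp only [waits]
    simpa [show (0 : Int) + t0 + e0 - e0 = t0 by ring, show (0:Int) + t0 = t0 by ring] using this

-- B's reversed fold, started at total = s + Σt, emits waits base s backwards
lemma foldB_rev : ∀ (l : List (Int × Int)) (base : Int) (acc : List Int) (s : Int),
    l.reverse.foldl (revBody base) (acc, s + (l.map (·.1)).sum)
      = (acc ++ (waits base s l).reverse, s) := by
  intro l
  induction l with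
  | nil => intro base acc s; simp [waits]
  | cons x r ih =>
    intro base acc s
    obtain ⟨t, e⟩ := x
    rw [List.reverse_cons, List.foldl_append]
    have : s + (((t, e) :: r).map (·.1)).sum = (s + t) + (r.map (·.1)).sum := by
      simp; ring
    rw [this, ih base acc (s + t)]
    simp [revBody, waits, List.append_assoc]
    ring_nf

-- on a nonempty list, Python min of the keys equals the key of the sorted head
lemma min_eq_head_key (orders : List (Int × Int)) (t0 e0 : Int) (r : List (Int × Int))
    (hs : PySem.List.sorted orders (fun x => x.2) false = (t0, e0) :: r) :
    PySem.List.min? (orders.map (·.2)) (fun y => y) = some e0 := by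
  have hne : orders.map (·.2) ≠ [] := by
    intro h
    have : orders = [] := by simpa using h
    rw [this] at hs; simp [PySem.List.sorted] at hs
  obtain ⟨m, hm⟩ : ∃ m, PySem.List.min? (orders.map (·.2)) (fun y => y) = some m := by
    cases h : PySem.List.min? (orders.map (·.2)) (fun y => y) with
    | none => exact absurd ((PySem.List.min?_eq_none_iff _ _).mp h) hne
    | some m => exact ⟨m, rfl⟩
  have hmmem : m ∈ orders.map (·.2) := PySem.List.min?_mem hm
  have hmin : ∀ y ∈ orders.map (·.2), m ≤ y := by
    intro y hy; exact PySem.List.min?_isMin hm y hy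
  -- e0 is a key of orders (head of a permutation), so m ≤ e0
  have hperm := PySem.List.sorted_perm orders (fun x => x.2) false
  have hhead : (t0, e0) ∈ orders := by
    have : (t0, e0) ∈ PySem.List.sorted orders (fun x => x.2) false := by
      rw [hs]; exact List.mem_cons_self
    exact hperm.mem_iff.mp this
  have h1 : m ≤ e0 := hmin e0 (List.mem_map.mpr ⟨(t0, e0), hhead, rfl⟩)
  -- e0 is minimal among keys (head of the sorted list), so e0 ≤ m
  have h2 : e0 ≤ m := by
    obtain ⟨p, hp, hpm⟩ := List.mem_map.mp hmmem
    have := PySem.List.key_head_sorted_le orders (fun x => x.2) hs p hp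
    simpa [hpm] using this
  rw [hm, le_antisymm h1 h2]

-- ===== VERDICT (by name: the statement is the Claim_ definition above) =====
theorem part1_spec : Claim_equal_part1 := by
  intro orders _
  unfold Spec_part1 part1 part1_alt
  by_cases hnil : orders = []
  · subst hnil; rfl
  · simp only [if_neg hnil]
    set os := PySem.List.sorted orders (fun x => x.2) false with hos
    rw [foldA_eq_waits os]
    cases hm : os with
    | nil =>
      exact absurd ((PySem.List.sorted_eq_nil_iff _ _ _).mp (hos ▸ hm)) hnil
    | cons hd r =>
      obtain ⟨t0, e0⟩ := hd
      rw [min_eq_head_key orders t0 e0 r (hos ▸ hm)]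
      simp only
      have := foldB_rev ((t0, e0) :: r) e0 [] 0
      rw [show (0 : Int) + (((t0, e0) :: r).map (·.1)).sum = (((t0, e0) :: r).map (·.1)).sum by ring] at this
      rw [this]
      simp
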